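-- pv_equiv track=rewrite | github.com/CodingVault/LeetCodeInPython | 1762_Buildings_With_an_Ocean_View_Level.py | with_view
-- ===== SOURCE A (Python) =====
-- def with_view(heights):
--     if not heights:
--         return []
--     max_height = heights[-1] - 1
--     res = []
--     for i in range(-1, -len(heights) - 1, -1):
--         if heights[i] > max_height:
--             res.append(i)
--             max_height = heights[i]
--     return [len(heights) + i for i in reversed(res)]
-- ===== SOURCE B (Python) =====
-- def with_view(heights):
--     stack = []  # monotonic stack of (index, height), heights strictly decreasing
--     for i, h in enumerate(heights):
--         while stack and stack[-1][1] <= h: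
--             stack.pop()
--         stack.append((i, h))
--     return [i for i, _ in stack]
-- ===== Notes on version B (the rewrite author's own statement) =====
-- stated objective: idiomatic
-- what changed: Replaced the right-to-left scan with a running max over negative indices (plus a final reverse-and-shift pass) by a single left-to-right monotonic decreasing stack of (index, height) pairs whose surviving indices are the answer directly.
import Mathlib
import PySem

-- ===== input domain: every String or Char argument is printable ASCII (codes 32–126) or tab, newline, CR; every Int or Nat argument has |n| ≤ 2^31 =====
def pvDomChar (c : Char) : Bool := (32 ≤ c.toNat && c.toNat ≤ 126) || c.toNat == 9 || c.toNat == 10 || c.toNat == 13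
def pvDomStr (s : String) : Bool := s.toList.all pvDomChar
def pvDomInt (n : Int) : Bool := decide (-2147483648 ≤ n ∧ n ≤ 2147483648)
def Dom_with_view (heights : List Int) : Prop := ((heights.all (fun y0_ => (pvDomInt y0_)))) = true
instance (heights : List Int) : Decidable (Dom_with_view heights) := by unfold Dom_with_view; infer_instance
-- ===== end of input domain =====

-- B replaces A's right-to-left running-max scan over negative indices (plus reverse-and-shift
-- output pass) by a left-to-right monotonic decreasing stack of (index, height) pairs.


-- ===== PORT A =====
-- literal port of A: right-to-left loop over negative indices with a running max,
-- then [len(heights) + i for i in reversed(res)]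
def with_view (heights : List Int) : List Int :=
  if heights = [] then []
  else
    let st := (PySem.List.pyRange (-1) (-(heights.length : Int) - 1) (-1)).foldl
      (fun (s : Int × List Int) (i : Int) =>
        let v := PySem.List.pyGetD heights i 0   -- heights[i]; i is always in range here
        if v > s.1 then (v, s.2 ++ [i]) else s)
      (PySem.List.pyGetD heights (-1) 0 - 1, [])
    st.2.reverse.map (fun i => (heights.length : Int) + i)

-- ===== PORT B =====
-- literal port of B: monotonic stack of (index, height) pairs; the Lean list keeps the
-- TOP of the Python stack at its head (the while-pop loop is dropWhile), so the final
-- list comprehension over the stack is a map over the reverse.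
def with_view_alt (heights : List Int) : List Int :=
  let stack := (PySem.List.enumerate heights).foldl
    (fun (s : List (Int × Int)) (p : Int × Int) =>
      p :: s.dropWhile (fun q => q.2 ≤ p.2)) []
  stack.reverse.map (fun q => q.1)

-- ===== PRECONDITION & SPEC =====
def Spec_with_view (heights : List Int) (out : List Int) : Prop := out = with_view_alt heights
instance (heights : List Int) (out : List Int) : Decidable (Spec_with_view heights out) := by unfold Spec_with_view; infer_instance

-- ===== CLAIM (what is proved, stated in full; the proofs are below) =====
def Claim_equal_with_view : Prop := ∀ (heights : List Int), Dom_with_view heights → Spec_with_view heights (with_view heights)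

-- ===== LEMMAS AND PROOFS =====

-- k is an "ocean view" index of l: everything strictly after position k is strictly smaller
def isView (l : List Int) (k : Nat) : Bool := (l.drop (k+1)).all (fun x => x < l.getD k 0)

-- the ocean-view indices, in increasing order: the common closed form both ports are proved equal to
def viewsNat (l : List Int) : List Nat := (List.range l.length).filter (isView l)

-- A's loop, re-indexed over Nat counters k = 0,1,…,len-1 (Python index i = -1-k)
def loopA (l : List Int) : Int × List Int :=
  (List.range l.length).foldl
    (fun (s : Int × List Int) (k : Nat) =>
      let v := PySem.List.pyGetD l (-1 - (k : Int)) 0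
      if v > s.1 then (v, s.2 ++ [-1 - (k : Int)]) else s)
    (PySem.List.pyGetD l (-1) 0 - 1, [])

theorem pyGetD_neg_cons (x : Int) (t : List Int) (k : Nat) (hk : k < t.length) :
    PySem.List.pyGetD (x :: t) (-1 - (k : Int)) 0 = PySem.List.pyGetD t (-1 - (k : Int)) 0 := by
  have h1 : (-1 - (k : Int)) = -((k+1 : Nat) : Int) := by push_cast; ring
  rw [h1, PySem.List.pyGetD_neg_natCast _ _ _ (by omega) (by simp; omega),
      PySem.List.pyGetD_neg_natCast _ _ _ (by omega) (by omega)]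
  simp only [List.length_cons]
  obtain ⟨j, hj⟩ : ∃ j, t.length - (k+1) = j := ⟨_, rfl⟩
  have e2 : t.length + 1 - (k+1) = j + 1 := by omega
  simp only [hj, e2, List.getElem_cons_succ]

theorem pyGetD_head_cons (x : Int) (t : List Int) :
    PySem.List.pyGetD (x :: t) (-1 - (t.length : Int)) 0 = x := by
  have h1 : (-1 - (t.length : Int)) = -((t.length+1 : Nat) : Int) := by push_cast; ring
  rw [h1, PySem.List.pyGetD_neg_natCast _ _ _ (by omega) (by simp)]
  simp

theorem pyGetD_last_cons (x : Int) (t : List Int) (h : t ≠ []) :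
    PySem.List.pyGetD (x :: t) (-1) 0 = PySem.List.pyGetD t (-1) 0 := by
  rw [PySem.List.pyGetD_neg_one _ 0 (by simp), PySem.List.pyGetD_neg_one _ 0 h, List.getLast_cons h]

theorem loopA_cons (x : Int) (t : List Int) (h : t ≠ []) :
    loopA (x :: t) =
      (let s := loopA t
       if x > s.1 then (x, s.2 ++ [-1 - (t.length : Int)]) else s) := by
  unfold loopA
  simp only [List.length_cons, List.range_succ, List.foldl_append, List.foldl_cons, List.foldl_nil]
  rw [pyGetD_last_cons x t h,
      PySem.List.foldl_congr_mem _ _ (fun (s : Int × List Int) (k : Nat) =>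
          let v := PySem.List.pyGetD t (-1 - (k : Int)) 0
          if v > s.1 then (v, s.2 ++ [-1 - (k : Int)]) else s) _
        (by intro acc k hk
            simp only []
            rw [pyGetD_neg_cons x t k (List.mem_range.mp hk)]),
      pyGetD_head_cons]

theorem loopA_singleton (x : Int) : loopA [x] = (x, [-1]) := by
  simp [loopA, List.range_succ, PySem.List.pyGetD]
  norm_num [PySem.List.pyIdx?, PySem.List.pyGet?]

theorem loopA_fst_lt (l : List Int) (h : l ≠ []) (c : Int) :
    ((loopA l).1 < c) ↔ (l.all (fun x => decide (x < c)) = true) := by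
  induction l with
  | nil => simp at h
  | cons x t ih =>
    by_cases ht : t = []
    · subst ht; simp [loopA_singleton]
    · rw [loopA_cons x t ht]
      simp only [List.all_cons, Bool.and_eq_true, decide_eq_true_eq]
      have hiff : ((loopA t).1 < c) ↔ (t.all (fun x => decide (x < c)) = true) := ih ht
      split_ifs with hx
      · constructor
        · intro hc; exact ⟨hc, hiff.mp (by omega)⟩
        · rintro ⟨h1, _⟩; exact h1
      · constructor
        · intro hc; exact ⟨by omega, hiff.mp hc⟩
        · rintro ⟨_, h2⟩; exact hiff.mpr h2

theorem viewsNat_cons (x : Int) (t : List Int) :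
    viewsNat (x :: t) =
      (if t.all (fun y => decide (y < x)) then [0] else []) ++ (viewsNat t).map (· + 1) := by
  have h0 : isView (x::t) 0 = t.all (fun y => decide (y < x)) := by simp [isView]
  have hs : ∀ k, isView (x::t) (k+1) = isView t k := fun k => by
    simp [isView, List.drop_succ_cons]
  simp only [viewsNat, List.length_cons, List.range_succ_eq_map, List.filter_cons, h0,
    List.filter_map]
  have hfc : (List.range t.length).filter (isView (x :: t) ∘ Nat.succ)
       = (List.range t.length).filter (isView t) := by
    apply List.filter_congr; intro k _; simp [Function.comp, hs k]
  rw [hfc]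
  by_cases hall : t.all (fun y => decide (y < x)) = true
  · simp [hall]
  · simp only [Bool.not_eq_true] at hall
    simp [hall]

theorem loopA_snd (l : List Int) (h : l ≠ []) :
    (loopA l).2 = ((viewsNat l).map (fun (k : Nat) => (k : Int) - l.length)).reverse := by
  induction l with
  | nil => simp at h
  | cons x t ih =>
    by_cases ht : t = []
    · subst ht
      simp [loopA_singleton, viewsNat, isView, List.range_succ]
    · rw [loopA_cons x t ht, viewsNat_cons]
      have hx := loopA_fst_lt t ht x
      have hmap : ((viewsNat t).map (· + 1)).map (fun (k : Nat) => (k : Int) - (x :: t).length)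
          = (viewsNat t).map (fun (k : Nat) => (k : Int) - t.length) := by
        rw [List.map_map]
        apply List.map_congr_left
        intro k _
        simp only [Function.comp, List.length_cons]
        push_cast; ring
      by_cases hall : t.all (fun y => decide (y < x)) = true
      · rw [if_pos hall, if_pos (hx.mpr hall)]
        simp only [List.map_append, List.map_cons, List.map_nil, List.reverse_append,
          List.reverse_cons, List.reverse_nil, List.nil_append, List.cons_append,
          List.singleton_append, List.append_nil]
        rw [hmap, ih ht]
        simp only [List.length_cons]
        push_cast; ring_nf

      · rw [if_neg hall, if_neg (fun hh => hall (hx.mp hh))]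
        simp only [List.nil_append]
        rw [hmap, ih ht]

theorem with_view_eq_loopA (l : List Int) (h : l ≠ []) :
    with_view l = (loopA l).2.reverse.map (fun i => (l.length : Int) + i) := by
  unfold with_view loopA
  rw [if_neg h, PySem.List.pyRange_neg_one]
  have e : (-1 - (-(l.length:Int) - 1)).toNat = l.length := by omega
  rw [e, List.foldl_map]

theorem with_view_closed (l : List Int) :
    with_view l = (viewsNat l).map (fun (k : Nat) => (k : Int)) := by
  by_cases h : l = []
  · subst h; simp [with_view, viewsNat]
  · rw [with_view_eq_loopA l h, loopA_snd l h, List.reverse_reverse, List.map_map]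
    apply List.map_congr_left
    intro k _
    simp only [Function.comp]
    ring

-- B side: a dropWhile along a list whose predicate, once false, stays false, is a filter
theorem dropWhile_eq_filter_of_pairwise {α : Type} (p : α → Bool) (s : List α)
    (hp : s.Pairwise (fun a b => p b = true → p a = true)) :
    s.dropWhile p = s.filter (fun x => !p x) := by
  induction s with
  | nil => rfl
  | cons x t ih =>
    rcases List.pairwise_cons.mp hp with ⟨hx, ht⟩
    by_cases hpx : p x = true
    · rw [List.dropWhile_cons_of_pos hpx, List.filter_cons_of_neg (by simp [hpx]), ih ht]
    · rw [List.dropWhile_cons_of_neg hpx, List.filter_cons_of_pos (by simp [hpx])]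
      have hself : t.filter (fun y => !p y) = t := by
        apply List.filter_eq_self.mpr
        intro y hy
        simp only [Bool.not_eq_true']
        by_contra hc
        simp only [Bool.not_eq_false] at hc
        exact hpx (hx y hy hc)
      rw [hself]

theorem viewsNat_mem_lt (l : List Int) (i j : Nat) (hi : isView l i = true)
    (hj : j < l.length) (hij : i < j) : l.getD j 0 < l.getD i 0 := by
  simp only [isView, List.all_eq_true, decide_eq_true_eq] at hi
  apply hi
  rw [List.getD_eq_getElem _ _ hj]
  have hjd : l[j] = (l.drop (i+1))[j - (i+1)]'(by simp; omega) := by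
    rw [List.getElem_drop]; congr 1; omega
  rw [hjd]
  exact List.getElem_mem _

theorem viewsNat_pairwise (l : List Int) :
    (viewsNat l).Pairwise (fun i j => l.getD j 0 < l.getD i 0) := by
  have h1 : (viewsNat l).Pairwise (· < ·) := (List.pairwise_lt_range).filter _
  refine h1.imp_of_mem ?_
  intro i j hi hj hij
  have hiv : isView l i = true := (List.mem_filter.mp hi).2
  have hjr : j < l.length := List.mem_range.mp (List.mem_filter.mp hj).1
  exact viewsNat_mem_lt l i j hiv hjr hij

theorem isView_append_lt (l : List Int) (x : Int) (k : Nat) (hk : k < l.length) :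
    isView (l ++ [x]) k = (isView l k && decide (x < l.getD k 0)) := by
  have hd : (l ++ [x]).drop (k+1) = l.drop (k+1) ++ [x] :=
    List.drop_append_of_le_length (by omega)
  have hg : (l ++ [x])[k]? = l[k]? := List.getElem?_append_left hk
  simp only [isView, List.getD, hd, hg, List.all_append, List.all_cons, List.all_nil, Bool.and_true]
  rfl

theorem isView_append_self (l : List Int) (x : Int) : isView (l ++ [x]) l.length = true := by
  have hd : (l ++ [x]).drop (l.length + 1) = [] := List.drop_of_length_le (by simp)
  simp [isView, hd]

theorem viewsNat_append (l : List Int) (x : Int) :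
    viewsNat (l ++ [x]) =
      (viewsNat l).filter (fun k => decide (x < l.getD k 0)) ++ [l.length] := by
  unfold viewsNat
  rw [List.length_append, List.length_singleton, List.range_succ, List.filter_append]
  congr 1
  · rw [List.filter_congr (fun k hk => isView_append_lt l x k (List.mem_range.mp hk)),
        List.filter_filter]
    apply List.filter_congr
    intro k _
    exact Bool.and_comm _ _
  · simp [isView_append_self l x]

theorem enumerate_append_singleton {α : Type} (xs : List α) (y : α) (s : Int) :
    PySem.List.enumerate (xs ++ [y]) s = PySem.List.enumerate xs s ++ [(s + xs.length, y)] := by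
  induction xs generalizing s with
  | nil => simp [PySem.List.enumerate_cons, PySem.List.enumerate_nil]
  | cons a as ih =>
    rw [List.cons_append, PySem.List.enumerate_cons, PySem.List.enumerate_cons, ih]
    simp only [List.length_cons, List.cons_append]
    congr 3
    push_cast; ring

theorem stackB_eq (l : List Int) :
    (PySem.List.enumerate l).foldl
        (fun (s : List (Int × Int)) (p : Int × Int) => p :: s.dropWhile (fun q => q.2 ≤ p.2)) []
      = ((viewsNat l).map (fun (k : Nat) => ((k : Int), l.getD k 0))).reverse := by
  induction l using List.reverseRecOn with
  | nil => simp [PySem.List.enumerate_nil, viewsNat]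
  | append_singleton l x ih =>
    rw [enumerate_append_singleton, List.foldl_append, List.foldl_cons, List.foldl_nil, ih]
    have hpair : (((viewsNat l).map (fun (k : Nat) => ((k : Int), l.getD k 0))).reverse).Pairwise
        (fun a b : Int × Int => (decide (b.2 ≤ x) = true) → (decide (a.2 ≤ x) = true)) := by
      rw [List.pairwise_reverse, List.pairwise_map]
      refine (viewsNat_pairwise l).imp ?_
      intro i j hij
      simp only [decide_eq_true_eq]
      omega
    rw [dropWhile_eq_filter_of_pairwise _ _ hpair, List.filter_reverse, List.filter_map,
        viewsNat_append, List.map_append, List.reverse_append]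
    simp only [List.map_cons, List.map_nil, List.reverse_cons, List.reverse_nil, List.nil_append,
      List.singleton_append]
    have hn : ((l ++ [x]).getD l.length 0) = x := by
      rw [List.getD_eq_getElem _ _ (by simp), List.getElem_append_right (by omega)]
      simp
    rw [hn]
    congr 1
    · simp
    · congr 1
      have hf : List.filter ((fun q : Int × Int => !decide (q.2 ≤ x)) ∘ fun (k : Nat) => ((k : Int), l.getD k 0)) (viewsNat l)
          = List.filter (fun k => decide (x < l.getD k 0)) (viewsNat l) := by
        apply List.filter_congr
        intro k _
        simp only [Function.comp_apply]
        rw [Bool.eq_iff_iff]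
        simp only [Bool.not_eq_true', decide_eq_false_iff_not, decide_eq_true_eq]
        omega
      rw [hf]
      apply List.map_congr_left
      intro k hk
      have hkl : k < l.length := by
        have hm := (List.mem_filter.mp hk).1
        exact List.mem_range.mp (List.mem_filter.mp hm).1
      have hg : (l ++ [x])[k]? = l[k]? := List.getElem?_append_left hkl
      simp [List.getD, hg]

theorem with_view_alt_closed (l : List Int) :
    with_view_alt l = (viewsNat l).map (fun (k : Nat) => (k : Int)) := by
  simp only [with_view_alt]
  rw [stackB_eq, List.reverse_reverse, List.map_map]
  rfl

-- ===== VERDICT (by name: the statement is the Claim_ definition above) =====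
theorem with_view_spec : Claim_equal_with_view := by
  intro heights _
  unfold Spec_with_view
  rw [with_view_closed, with_view_alt_closed]
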